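-- pv_equiv track=rewrite | github.com/alumnos-ingcom/TP5-GastonPrat | tp5ej01.py | par_impar
-- ===== SOURCE A (Python) =====
-- def par_impar(numero):
--     numero = str(numero)
--     primer_cifra = numero[-1]
--     primer_cifra = int(primer_cifra)
--     while primer_cifra > 0:
--         primer_cifra = primer_cifra-2
--     if primer_cifra == 0:
--         resultado = True
--     else:
--         resultado = False
--     return resultado
-- ===== SOURCE B (Python) =====
-- def par_impar(numero):
--     # Same digit extraction as A (str -> last char -> int), but the parity
--     # of that digit is computed in closed form instead of a subtraction loop.
--     return int(str(numero)[-1]) % 2 == 0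
-- ===== Notes on version B (the rewrite author's own statement) =====
-- stated objective: idiomatic
-- what changed: Replaced the repeated-subtract-2 while loop plus if/else by a direct closed-form modulo parity test on the last digit.
import Mathlib
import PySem

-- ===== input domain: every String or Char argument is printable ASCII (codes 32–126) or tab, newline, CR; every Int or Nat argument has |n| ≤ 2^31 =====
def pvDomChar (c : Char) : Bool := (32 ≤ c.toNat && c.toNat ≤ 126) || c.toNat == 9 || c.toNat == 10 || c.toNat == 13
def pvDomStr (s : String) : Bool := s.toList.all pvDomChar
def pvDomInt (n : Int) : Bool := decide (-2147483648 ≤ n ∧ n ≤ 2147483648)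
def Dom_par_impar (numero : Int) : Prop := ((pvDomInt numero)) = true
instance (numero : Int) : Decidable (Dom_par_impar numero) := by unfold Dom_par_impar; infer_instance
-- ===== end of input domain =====

-- B replaces A's subtract-2-until-nonpositive parity loop on the last digit by a
-- closed-form `digit % 2 == 0`; same str/last-char/int extraction, same results.

-- ===== PORT A =====
-- while primer_cifra > 0: primer_cifra = primer_cifra - 2
def parLoop (d : Int) : Int :=
  if 0 < d then parLoop (d - 2) else d
termination_by d.toNat
decreasing_by omega

def par_impar (numero : Int) : Bool :=
  let s := PySem.Int.toStr numero            -- numero = str(numero)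
  match PySem.Str.pyGet? s (-1) with         -- primer_cifra = numero[-1]
  | none => false                            -- unreachable: str(int) is never empty
  | some ch =>
    match PySem.Int.ofChars? [ch] with       -- primer_cifra = int(primer_cifra)
    | none => false                          -- unreachable: last char of str(int) is a digit
    | some d =>
      let d' := parLoop d                    -- the while loop
      if d' = 0 then true else false         -- if/else on primer_cifra == 0

-- ===== PORT B =====
def par_impar_alt (numero : Int) : Bool :=
  match PySem.Str.pyGet? (PySem.Int.toStr numero) (-1) with
  | none => false                            -- unreachable: str(int) is never empty
  | some ch =>
    match PySem.Int.ofChars? [ch] with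
    | none => false                          -- unreachable: last char of str(int) is a digit
    | some d => PySem.Int.mod d 2 == 0       -- int(str(numero)[-1]) % 2 == 0

-- ===== PRECONDITION & SPEC =====
def Spec_par_impar (numero : Int) (out : Bool) : Prop := out = par_impar_alt numero
instance (numero : Int) (out : Bool) : Decidable (Spec_par_impar numero out) := by unfold Spec_par_impar; infer_instance

-- ===== CLAIM (what is proved, stated in full; the proofs are below) =====
def Claim_equal_par_impar : Prop := ∀ (numero : Int), Dom_par_impar numero → Spec_par_impar numero (par_impar numero)

-- ===== LEMMAS AND PROOFS =====

-- Pushing onto a nonempty accumulator never changes the last element.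
lemma toDigitsCore_getLast? (b : Nat) : ∀ (f n : Nat) (c : Char) (ds : List Char),
    (Nat.toDigitsCore b f n (c :: ds)).getLast? = (c :: ds).getLast? := by
  intro f
  induction f with
  | zero => intro n c ds; simp [Nat.toDigitsCore]
  | succ f ih =>
    intro n c ds
    simp only [Nat.toDigitsCore]
    split
    · rfl
    · rw [ih]
      simp [List.getLast?_cons]

lemma toDigits_getLast? (m : Nat) :
    (Nat.toDigits 10 m).getLast? = some (Nat.digitChar (m % 10)) := by
  unfold Nat.toDigits
  simp only [Nat.toDigitsCore]
  split
  · rfl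
  · rw [toDigitsCore_getLast?]
    rfl

lemma toChars_getLast? (n : Int) :
    (PySem.Int.toChars n).getLast? = some (Nat.digitChar (n.natAbs % 10)) := by
  unfold PySem.Int.toChars
  split
  · rename_i h
    rw [List.getLast?_cons, toDigits_getLast?]
    simp
  · rename_i h
    rw [show n.toNat = n.natAbs by omega]
    exact toDigits_getLast? _

lemma pyGet?_neg_one {α : Type} (l : List α) (h : l ≠ []) :
    PySem.List.pyGet? l (-1) = l.getLast? := by
  have hl : 0 < l.length := List.length_pos_iff.mpr h
  simp only [PySem.List.pyGet?, PySem.List.pyIdx?]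
  rw [if_neg (by omega), if_pos (by simp; omega)]
  simp only [Option.bind_some]
  rw [List.getLast?_eq_getElem?]
  norm_num

lemma toChars_ne_nil (n : Int) : PySem.Int.toChars n ≠ [] := by
  intro h
  have := toChars_getLast? n
  rw [h] at this
  simp at this

lemma lastDigit_extract (n : Int) :
    PySem.Str.pyGet? (PySem.Int.toStr n) (-1) = some (Nat.digitChar (n.natAbs % 10)) := by
  unfold PySem.Str.pyGet? PySem.Chars.pyGet?
  rw [show (PySem.Int.toStr n).toList = PySem.Int.toChars n from PySem.Int.toList_toStr n]
  rw [pyGet?_neg_one _ (toChars_ne_nil n), toChars_getLast?]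

lemma parLoop_eq : ∀ (k : Nat) (d : Int), d.toNat = k → 0 ≤ d →
    parLoop d = if d % 2 = 0 then 0 else -1 := by
  intro k
  induction k using Nat.strong_induction_on with
  | _ k ih =>
    intro d hk hd
    rw [parLoop]
    by_cases h1 : 0 < d
    · rw [if_pos h1]
      by_cases h2 : d = 1
      · subst h2
        rw [parLoop]
        norm_num
      · have hrec := ih (d - 2).toNat (by omega) (d - 2) rfl (by omega)
        rw [hrec]
        have : (d - 2) % 2 = d % 2 := by omega
        rw [this]
    · rw [if_neg h1]
      have : d = 0 := by omega
      subst this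
      norm_num

lemma fmod_two (d : Int) : PySem.Int.mod d 2 = d % 2 := by
  unfold PySem.Int.mod
  rw [Int.fmod_eq_emod]
  simp

-- ===== VERDICT (by name: the statement is the Claim_ definition above) =====
theorem par_impar_spec : Claim_equal_par_impar := by
  intro n _
  unfold Spec_par_impar
  have hm10 : n.natAbs % 10 < 10 := Nat.mod_lt _ (by norm_num)
  set m : Nat := n.natAbs % 10 with hm
  have hof : PySem.Int.ofChars? [Nat.digitChar m] = some (m : Int) := by
    interval_cases m <;> decide
  simp only [par_impar, par_impar_alt, lastDigit_extract, ← hm, hof]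
  rw [parLoop_eq (m : Int).toNat (m : Int) rfl (by positivity), fmod_two]
  rcases Int.emod_two_eq (m : Int) with h | h <;> simp [h]
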